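-- pv_equiv track=rewrite | github.com/tomhyhan/PEuler | gaj0.py | helper
-- ===== SOURCE A (Python) =====
-- def helper(node, a, graph, visited):
--     visited.add(node)
--
--     curr_sum = a[node]
--     curr_w = 0
--     for nnode in graph[node]:
--         if nnode in visited:
--             continue
--         next_sum, next_w = helper(nnode, a, graph, visited)
--         curr_sum += next_sum
--         curr_w += next_w
--
--     return curr_sum, abs(curr_sum) + curr_w
-- ===== SOURCE B (Python) =====
-- def helper(node, a, graph, visited):
--     # Iterative post-order DFS with an explicit stack of frames
--     # [node, next-neighbour index, running sum, running weight].
--     visited.add(node)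
--     stack = [[node, 0, a[node], 0]]
--     while True:
--         nd, i, s, w = stack[-1]
--         adj = graph[nd]
--         if i < len(adj):
--             stack[-1][1] = i + 1
--             n = adj[i]
--             if n not in visited:
--                 visited.add(n)
--                 stack.append([n, 0, a[n], 0])
--         else:
--             stack.pop()
--             if not stack:
--                 return s, abs(s) + w
--             stack[-1][2] += s
--             stack[-1][3] += abs(s) + w
-- ===== Notes on version B (the rewrite author's own statement) =====
-- stated objective: alternative
-- what changed: The recursive DFS over the graph is replaced by an iterative post-order traversal driven by an explicit stack of frames (node, next-neighbour index, running sum, running weight), folding a child's result into its parent's accumulators when the child's frame is popped.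
import Mathlib
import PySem

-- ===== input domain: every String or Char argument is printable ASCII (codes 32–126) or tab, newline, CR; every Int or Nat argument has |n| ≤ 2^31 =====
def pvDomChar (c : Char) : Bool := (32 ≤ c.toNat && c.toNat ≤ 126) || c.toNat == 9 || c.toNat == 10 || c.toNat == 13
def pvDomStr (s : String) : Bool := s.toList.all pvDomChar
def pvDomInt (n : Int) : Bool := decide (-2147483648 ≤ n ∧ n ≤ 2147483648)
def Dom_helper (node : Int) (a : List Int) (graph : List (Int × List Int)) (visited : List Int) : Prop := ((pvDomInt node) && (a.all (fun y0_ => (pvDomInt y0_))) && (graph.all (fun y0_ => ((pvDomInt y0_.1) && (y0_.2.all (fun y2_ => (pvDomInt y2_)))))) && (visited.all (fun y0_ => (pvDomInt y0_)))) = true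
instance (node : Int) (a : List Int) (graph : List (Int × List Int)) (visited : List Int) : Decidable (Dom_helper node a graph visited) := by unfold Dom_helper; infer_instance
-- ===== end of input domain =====

-- B replaces A's recursive DFS by an iterative post-order traversal over an explicit stack of
-- frames (alternative decomposition, same cost). Both A and B mutate `visited` identically in
-- Python; the equivalence proved here is about the RETURN value (the ports thread the set).

-- ===== PORT A =====
-- A is recursive; the Lean port uses fuel (Option, none = fuel exhausted) purely as a
-- totality guard; the fuel chosen in `helper` is proved sufficient below (pvSuffA).
mutual
def helperA (a : List Int) (graph : List (Int × List Int)) : Nat → Int → List Int → Option ((Int × Int) × List Int)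
  | 0, _, _ => none
  | Nat.succ f, node, visited =>
      let visited1 : PySem.Set Int := PySem.Set.add visited node
      let currSum : Int := PySem.List.pyGetD a node 0    -- a[node]; Pre_ guarantees the index is in range
      match loopA a graph f ((PySem.Dict.mk graph).getD node []) currSum 0 visited1 with
      | none => none
      | some ((s, w), v) => some ((s, |s| + w), v)
  termination_by f node visited => (f, 0)

def loopA (a : List Int) (graph : List (Int × List Int)) : Nat → List Int → Int → Int → List Int → Option ((Int × Int) × List Int)
  | _, [], s, w, v => some ((s, w), v)
  | f, n :: ns, s, w, v =>
      if PySem.Set.contains v n then loopA a graph f ns s w v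
      else match helperA a graph f n v with
        | none => none
        | some ((ns2, nw), v') => loopA a graph f ns (s + ns2) (w + nw) v'
  termination_by f ns s w v => (f, ns.length + 1)
end

def helper (node : Int) (a : List Int) (graph : List (Int × List Int)) (visited : List Int) : Int × Int :=
  ((helperA a graph ((graph.flatMap (fun p => p.2)).length + 2) node visited).getD ((0, 0), visited)).1

-- ===== PORT B =====
-- pv* definitions and lemmas below are the termination measure of runB (cited by its decreasing_by)
def pvAllAdj (graph : List (Int × List Int)) : List Int := graph.flatMap (fun p => p.2)
def pvAdjOf (graph : List (Int × List Int)) (nd : Int) : List Int := (PySem.Dict.mk graph).getD nd []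

theorem pvMemAdj {graph : List (Int × List Int)} {nd x : Int} (h : x ∈ pvAdjOf graph nd) : x ∈ pvAllAdj graph := by
  induction graph with
  | nil => simp [pvAdjOf, PySem.Dict.getD, PySem.Dict.get?] at h
  | cons p rest ih =>
    obtain ⟨k, l⟩ := p
    simp only [pvAdjOf, PySem.Dict.getD, PySem.Dict.get?_mk_cons] at h ih
    simp only [pvAllAdj, List.flatMap_cons, List.mem_append]
    by_cases hk : k == nd
    · simp [hk] at h; exact Or.inl h
    · simp [hk] at h
      exact Or.inr (ih h)

theorem pvAdjLen (graph : List (Int × List Int)) (nd : Int) : (pvAdjOf graph nd).length ≤ (pvAllAdj graph).length := by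
  induction graph with
  | nil => simp [pvAdjOf, pvAllAdj, PySem.Dict.getD, PySem.Dict.get?]
  | cons p rest ih =>
    obtain ⟨k, l⟩ := p
    have hlen : (pvAllAdj ((k, l) :: rest)).length = l.length + (pvAllAdj rest).length := by
      simp [pvAllAdj]
    rw [hlen]
    simp only [pvAdjOf, PySem.Dict.getD, PySem.Dict.get?_mk_cons] at ih ⊢
    by_cases hk : k == nd
    · simp [hk]
    · simp only [hk, if_false, Bool.false_eq_true]
      exact le_trans ih (Nat.le_add_left _ _)
def pvUnvis (graph : List (Int × List Int)) (v : List Int) : Nat :=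
  (PySem.Set.ofList (pvAllAdj graph)).countP (fun x => !(PySem.Set.contains v x))

theorem pvContTrue (v : List Int) (x : Int) : PySem.Set.contains v x = true ↔ x ∈ v := by simp

theorem pvContMono {v v' : List Int} (h : ∀ x ∈ v, x ∈ v') (S : List Int) :
    S.countP (fun x => !(PySem.Set.contains v' x)) ≤ S.countP (fun x => !(PySem.Set.contains v x)) := by
  apply List.countP_mono_left
  intro x _ hx
  have hx' : x ∉ v' := by simpa using hx
  have hxv : x ∉ v := fun hm => hx' (h x hm)
  simpa using hxv

theorem pvCountAdd {v : List Int} {x : Int} (hv : PySem.Set.contains v x = false) :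
    ∀ (S : List Int), x ∈ S →
      S.countP (fun y => !(PySem.Set.contains (PySem.Set.add v x) y)) + 1 ≤
      S.countP (fun y => !(PySem.Set.contains v y)) := by
  intro S hS
  induction S with
  | nil => cases hS
  | cons z S ih =>
    have hsub : ∀ y ∈ v, y ∈ PySem.Set.add v x := fun y hy => by
      simp [PySem.Set.mem_add, hy]
    have hmono := pvContMono hsub S
    simp only [List.countP_cons]
    by_cases hzx : z = x
    · subst hzx
      have h1 : (!(PySem.Set.contains (PySem.Set.add v z) z)) = false := by
        have hm : PySem.Set.contains (PySem.Set.add v z) z = true :=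
          (pvContTrue _ _).mpr (by simp [PySem.Set.mem_add])
        rw [hm]; rfl
      have h2 : (!(PySem.Set.contains v z)) = true := by simpa using hv
      rw [h1, h2]
      simp only [Bool.false_eq_true, if_false, if_true]
      omega
    · have hqp : ((!(PySem.Set.contains (PySem.Set.add v x) z)) = true) → ((!(PySem.Set.contains v z)) = true) := by
        intro hq
        by_cases hzv : z ∈ v
        · exact absurd ((pvContTrue _ _).mpr (hsub z hzv)) (by simpa using hq)
        · simpa using hzv
      have hxS : x ∈ S := by
        rcases List.mem_cons.mp hS with h | h
        · exact absurd h.symm hzx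
        · exact h
      have hih := ih hxS
      by_cases hq : (!(PySem.Set.contains (PySem.Set.add v x) z)) = true
      · rw [if_pos hq, if_pos (hqp hq)]
        omega
      · rw [if_neg hq]
        split_ifs <;> omega

theorem pvUnvisAdd {graph : List (Int × List Int)} {v : List Int} {x : Int}
    (hx : x ∈ pvAllAdj graph) (hv : PySem.Set.contains v x = false) :
    pvUnvis graph (PySem.Set.add v x) + 1 ≤ pvUnvis graph v :=
  pvCountAdd hv _ (by simpa using hx)
def pvCost (graph : List (Int × List Int)) (fr : Int × Nat × Int × Int) : Nat :=
  (pvAdjOf graph fr.1).length - fr.2.1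
def pvPhi (graph : List (Int × List Int)) (stack : List (Int × Nat × Int × Int)) (v : List Int) : Nat :=
  pvUnvis graph v * ((pvAllAdj graph).length + 2) + (stack.map (pvCost graph)).sum + stack.length

def runB (a : List Int) (graph : List (Int × List Int)) : List (Int × Nat × Int × Int) → List Int → Int × Int
  | [], _ => (0, 0)
  | (nd, i, s, w) :: rest, v =>
      if h : i < (pvAdjOf graph nd).length then
        if PySem.Set.contains v ((pvAdjOf graph nd).getD i 0) then runB a graph ((nd, i + 1, s, w) :: rest) v
        else runB a graph (((pvAdjOf graph nd).getD i 0, 0, PySem.List.pyGetD a ((pvAdjOf graph nd).getD i 0) 0, 0) :: (nd, i + 1, s, w) :: rest) (PySem.Set.add v ((pvAdjOf graph nd).getD i 0))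
      else
        match rest with
        | [] => (s, |s| + w)
        | (pn, pi, ps, pw) :: rr => runB a graph ((pn, pi, ps + s, pw + (|s| + w)) :: rr) v
termination_by stack v => pvPhi graph stack v
decreasing_by
  · simp only [pvPhi, List.map_cons, List.sum_cons, List.length_cons, pvCost]
    omega
  · rename_i hnv
    have hv : PySem.Set.contains v ((pvAdjOf graph nd).getD i 0) = false := by
      simpa using hnv
    have hn_mem : (pvAdjOf graph nd).getD i 0 ∈ pvAllAdj graph := by
      apply pvMemAdj (nd := nd)
      rw [List.getD_eq_getElem _ _ h]
      exact List.getElem_mem h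
    have hu := pvUnvisAdd (graph := graph) hn_mem hv
    have hlen := pvAdjLen graph ((pvAdjOf graph nd).getD i 0)
    have hmul : pvUnvis graph (PySem.Set.add v ((pvAdjOf graph nd).getD i 0)) * ((pvAllAdj graph).length + 2) + ((pvAllAdj graph).length + 2) ≤ pvUnvis graph v * ((pvAllAdj graph).length + 2) := by
      have h2 := Nat.mul_le_mul_right ((pvAllAdj graph).length + 2) hu
      calc pvUnvis graph (PySem.Set.add v ((pvAdjOf graph nd).getD i 0)) * ((pvAllAdj graph).length + 2) + ((pvAllAdj graph).length + 2)
          = (pvUnvis graph (PySem.Set.add v ((pvAdjOf graph nd).getD i 0)) + 1) * ((pvAllAdj graph).length + 2) := by ring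
        _ ≤ pvUnvis graph v * ((pvAllAdj graph).length + 2) := h2
    simp only [pvPhi, List.map_cons, List.sum_cons, List.length_cons, pvCost]
    omega
  · simp only [pvPhi, List.map_cons, List.sum_cons, List.length_cons, pvCost]
    omega

def helper_alt (node : Int) (a : List Int) (graph : List (Int × List Int)) (visited : List Int) : Int × Int :=
  runB a graph [(node, 0, PySem.List.pyGetD a node 0, 0)] (PySem.Set.add visited node)

-- ===== PRECONDITION & SPEC =====
-- pvReach: the set of nodes reachable from `start` along graph edges that avoid the initially
-- visited nodes (iterated closure; membership stabilises after at most |edges|+1 rounds).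
def pvStep (graph : List (Int × List Int)) (visited : List Int) (R : List Int) : List Int :=
  R ++ ((R.flatMap (fun u => pvAdjOf graph u)).filter (fun n => !(visited.contains n) && !(R.contains n)))
def pvReach (graph : List (Int × List Int)) (visited : List Int) (start : Int) : List Int :=
  (pvStep graph visited)^[(pvAllAdj graph).length + 1] [start]

-- Pre_: exactly the inputs on which the Python A returns normally — every node reachable from
-- `node` through non-visited vertices must be a key of `graph` with an index valid for `a`;
-- otherwise the DFS recurses into it and raises KeyError or IndexError.
def Pre_helper (node : Int) (a : List Int) (graph : List (Int × List Int)) (visited : List Int) : Prop :=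
  ∀ u ∈ pvReach graph visited node,
    u ∈ graph.map (fun p => p.1) ∧ -(a.length : Int) ≤ u ∧ u < a.length
instance (node : Int) (a : List Int) (graph : List (Int × List Int)) (visited : List Int) : Decidable (Pre_helper node a graph visited) := by unfold Pre_helper; infer_instance

def pvWitness_helper : Int × List Int × (List (Int × List Int)) × List Int :=
  (0, [5, -3], [(0, [1]), (1, [])], [])

def Spec_helper (node : Int) (a : List Int) (graph : List (Int × List Int)) (visited : List Int) (out : Int × Int) : Prop := out = helper_alt node a graph visited
instance (node : Int) (a : List Int) (graph : List (Int × List Int)) (visited : List Int) (out : Int × Int) : Decidable (Spec_helper node a graph visited out) := by unfold Spec_helper; infer_instance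

-- ===== CLAIM (what is proved, stated in full; the proofs are below) =====
def Claim_equal_helper : Prop := ∀ (node : Int) (a : List Int) (graph : List (Int × List Int)) (visited : List Int), Dom_helper node a graph visited → Pre_helper node a graph visited → Spec_helper node a graph visited (helper node a graph visited)

-- ===== LEMMAS AND PROOFS =====

-- fuel sufficiency for A's port
theorem pvUnvisMono {graph : List (Int × List Int)} {v v' : List Int} (h : ∀ x ∈ v, x ∈ v') :
    pvUnvis graph v' ≤ pvUnvis graph v := pvContMono h _

theorem pvSuffLoop (a : List Int) (graph : List (Int × List Int)) (f : Nat)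
    (IH : ∀ node v, pvUnvis graph (PySem.Set.add v node) < f →
      ∃ s w v', helperA a graph f node v = some ((s, w), v') ∧ ∀ x ∈ PySem.Set.add v node, x ∈ v') :
    ∀ rem s w v, (∀ n ∈ rem, n ∈ pvAllAdj graph) → pvUnvis graph v ≤ f →
      ∃ s' w' v', loopA a graph f rem s w v = some ((s', w'), v') ∧ ∀ x ∈ v, x ∈ v' := by
  intro rem
  induction rem with
  | nil => exact fun s w v _ _ => ⟨s, w, v, by simp only [loopA], fun x hx => hx⟩
  | cons n ns ih =>
    intro s w v hsub hf
    by_cases hc : PySem.Set.contains v n = true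
    · obtain ⟨s', w', v', hrun, hsup⟩ := ih s w v (fun m hm => hsub m (List.mem_cons_of_mem _ hm)) hf
      exact ⟨s', w', v', by simp only [loopA, hc, if_true]; exact hrun, hsup⟩
    · have hcf : PySem.Set.contains v n = false := by simpa using hc
      have hnU : n ∈ pvAllAdj graph := hsub n List.mem_cons_self
      have hlt : pvUnvis graph (PySem.Set.add v n) < f := by
        have := pvUnvisAdd (graph := graph) hnU hcf
        omega
      obtain ⟨s1, w1, v1, hrun1, hsup1⟩ := IH n v hlt
      have hf1 : pvUnvis graph v1 ≤ f := by
        have h1 := pvUnvisMono (graph := graph) hsup1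
        have := pvUnvisAdd (graph := graph) hnU hcf
        omega
      obtain ⟨s', w', v', hrun2, hsup2⟩ := ih (s + s1) (w + w1) v1 (fun m hm => hsub m (List.mem_cons_of_mem _ hm)) hf1
      refine ⟨s', w', v', ?_, fun x hx => hsup2 x (hsup1 x (by simp [PySem.Set.mem_add, hx]))⟩
      simp only [loopA, hcf, Bool.false_eq_true, if_false, hrun1]
      exact hrun2

theorem pvSuffA (a : List Int) (graph : List (Int × List Int)) :
    ∀ f node v, pvUnvis graph (PySem.Set.add v node) < f →
      ∃ s w v', helperA a graph f node v = some ((s, w), v') ∧ ∀ x ∈ PySem.Set.add v node, x ∈ v' := by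
  intro f
  induction f with
  | zero => exact fun node v h => absurd h (Nat.not_lt_zero _)
  | succ f ihf =>
    intro node v h
    obtain ⟨s, w, v', hrun, hsup⟩ :=
      pvSuffLoop a graph f ihf (pvAdjOf graph node) (PySem.List.pyGetD a node 0) 0
        (PySem.Set.add v node) (fun m hm => pvMemAdj hm) (by omega)
    refine ⟨s, |s| + w, v', ?_, hsup⟩
    simp only [helperA, pvAdjOf] at hrun ⊢
    rw [hrun]

-- simulation: B's stack machine computes A's recursion
def popCont (a : List Int) (graph : List (Int × List Int)) (rest : List (Int × Nat × Int × Int)) (res : Int × Int) (v : List Int) (r : Int × Int) : Prop :=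
  match rest with
  | [] => r = res
  | (pn, pi, ps, pw) :: rr => runB a graph ((pn, pi, ps + res.1, pw + res.2) :: rr) v = r

theorem pvSimLoop (a : List Int) (graph : List (Int × List Int)) (f : Nat)
    (IH : ∀ n v out, helperA a graph f n v = some out →
      ∀ rest r, popCont a graph rest out.1 out.2 r →
        runB a graph ((n, 0, PySem.List.pyGetD a n 0, 0) :: rest) (PySem.Set.add v n) = r) :
    ∀ rem s w v s' w' v', loopA a graph f rem s w v = some ((s', w'), v') →
      ∀ nd (i : Nat) rest r, (pvAdjOf graph nd).drop i = rem →
        popCont a graph rest (s', |s'| + w') v' r → runB a graph ((nd, i, s, w) :: rest) v = r := by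
  intro rem
  induction rem with
  | nil =>
    intro s w v s' w' v' hrun nd i rest r hdrop hpc
    simp only [loopA, Option.some.injEq, Prod.mk.injEq] at hrun
    obtain ⟨⟨hs, hw⟩, hv⟩ := hrun
    subst hs; subst hw; subst hv
    have hlen : ¬ i < (pvAdjOf graph nd).length := by
      have := congrArg List.length hdrop
      simp only [List.length_drop, List.length_nil] at this
      omega
    rw [runB.eq_def]
    dsimp only
    rw [dif_neg hlen]
    cases rest with
    | nil => simpa [popCont] using hpc.symm
    | cons p rr =>
      obtain ⟨pn, pi, ps, pw⟩ := p
      simpa [popCont] using hpc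
  | cons n ns ih =>
    intro s w v s' w' v' hrun nd i rest r hdrop hpc
    have hi : i < (pvAdjOf graph nd).length := by
      have := congrArg List.length hdrop
      simp only [List.length_drop, List.length_cons] at this
      omega
    have hget : (pvAdjOf graph nd).getD i 0 = n := by
      have h2 := congrArg List.head? hdrop
      rw [List.head?_drop] at h2
      simp only [List.head?_cons] at h2
      rw [List.getD_eq_getElem _ _ hi]
      exact Option.some.inj (by rw [← List.getElem?_eq_getElem hi, h2])
    have hdrop1 : (pvAdjOf graph nd).drop (i + 1) = ns := by
      have h2 := congrArg List.tail hdrop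
      simpa [List.tail_drop] using h2
    rw [runB.eq_def]
    dsimp only
    rw [dif_pos hi, hget]
    by_cases hc : PySem.Set.contains v n = true
    · rw [if_pos hc]
      simp only [loopA, hc, if_true] at hrun
      exact ih s w v s' w' v' hrun nd (i + 1) rest r hdrop1 hpc
    · have hcf : PySem.Set.contains v n = false := by simpa using hc
      rw [if_neg hc]
      simp only [loopA, hcf, Bool.false_eq_true, if_false] at hrun
      cases hh : helperA a graph f n v with
      | none => rw [hh] at hrun; simp at hrun
      | some out =>
        obtain ⟨⟨s1, w1⟩, v1⟩ := out
        rw [hh] at hrun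
        exact IH n v ((s1, w1), v1) hh ((nd, i + 1, s, w) :: rest) r
          (ih (s + s1) (w + w1) v1 s' w' v' hrun nd (i + 1) rest r hdrop1 hpc)

theorem pvSim (a : List Int) (graph : List (Int × List Int)) :
    ∀ f n v out, helperA a graph f n v = some out →
      ∀ rest r, popCont a graph rest out.1 out.2 r →
        runB a graph ((n, 0, PySem.List.pyGetD a n 0, 0) :: rest) (PySem.Set.add v n) = r := by
  intro f
  induction f with
  | zero => intro n v out h; simp [helperA] at h
  | succ f ihf =>
    intro n v out h rest r hpc
    simp only [helperA] at h
    cases hl : loopA a graph f ((PySem.Dict.mk graph).getD n []) (PySem.List.pyGetD a n 0) 0 (PySem.Set.add v n) with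
    | none => rw [hl] at h; simp at h
    | some res =>
      obtain ⟨⟨s, w⟩, v1⟩ := res
      rw [hl] at h
      simp only [Option.some.injEq] at h
      subst h
      exact pvSimLoop a graph f ihf (pvAdjOf graph n) (PySem.List.pyGetD a n 0) 0
        (PySem.Set.add v n) s w v1 (by simpa [pvAdjOf] using hl) n 0 rest r rfl hpc

-- ===== VERDICT (by name: the statement is the Claim_ definition above) =====
theorem helper_spec : Claim_equal_helper := by
  intro node a graph visited hdom hpre
  unfold Spec_helper
  have hF : pvUnvis graph (PySem.Set.add visited node) < (graph.flatMap (fun p => p.2)).length + 2 := by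
    have h1 : pvUnvis graph (PySem.Set.add visited node) ≤ (PySem.Set.ofList (pvAllAdj graph)).length :=
      List.countP_le_length
    have h2 := PySem.Set.length_ofList_le (xs := pvAllAdj graph)
    simp only [pvAllAdj] at h1 h2 ⊢
    omega
  obtain ⟨s, w, v', hrun, _⟩ := pvSuffA a graph ((graph.flatMap (fun p => p.2)).length + 2) node visited hF
  have hB := pvSim a graph ((graph.flatMap (fun p => p.2)).length + 2) node visited ((s, w), v') hrun [] (s, w) (by simp [popCont])
  unfold helper helper_alt
  rw [hrun, hB]
  rfl
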